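-- pv_equiv track=rewrite | github.com/python-decoded/check_io | tasks/escher_tasks/task_11__card_game.py | cards_while_loop
-- ===== SOURCE A (Python) =====
-- def cards_while_loop(deck: int, hand: list):
--
--     hand = list(hand)
--
--     while deck:
--         if deck in hand:
--             hand.remove(deck)
--         elif deck - 1 in hand:
--             hand.remove(deck - 1)
--
--         deck -= 1
--
--     return len(hand) == 0
-- ===== SOURCE B (Python) =====
-- def _play(counts, d):
--     if counts.get(d, 0) > 0:
--         counts[d] = counts[d] - 1
--     elif counts.get(d - 1, 0) > 0:
--         counts[d - 1] = counts[d - 1] - 1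
--
-- def cards_while_loop(deck: int, hand: list):
--     counts = {}
--     for v in hand:
--         counts[v] = counts.get(v, 0) + 1
--     cands = set()
--     for v in counts:
--         cands.add(v)
--         cands.add(v + 1)
--     order = sorted((d for d in cands if 1 <= d <= deck), reverse=True)
--     for d in order:
--         _play(counts, d)
--     return sum(counts.values()) == 0
-- ===== Notes on version B (the rewrite author's own statement) =====
-- stated objective: faster
-- what changed: Instead of counting the deck down one card at a time and scanning/removing from a hand list at each step, B builds a count map of the hand once, computes the only deck values that can matter (each hand value and its successor, clipped to [1, deck]), processes just those in descending order decrementing counts, and checks that all counts reached zero; Pre_ excludes deck < 0, where A's 'while deck:' loop never terminates.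
import Mathlib
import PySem

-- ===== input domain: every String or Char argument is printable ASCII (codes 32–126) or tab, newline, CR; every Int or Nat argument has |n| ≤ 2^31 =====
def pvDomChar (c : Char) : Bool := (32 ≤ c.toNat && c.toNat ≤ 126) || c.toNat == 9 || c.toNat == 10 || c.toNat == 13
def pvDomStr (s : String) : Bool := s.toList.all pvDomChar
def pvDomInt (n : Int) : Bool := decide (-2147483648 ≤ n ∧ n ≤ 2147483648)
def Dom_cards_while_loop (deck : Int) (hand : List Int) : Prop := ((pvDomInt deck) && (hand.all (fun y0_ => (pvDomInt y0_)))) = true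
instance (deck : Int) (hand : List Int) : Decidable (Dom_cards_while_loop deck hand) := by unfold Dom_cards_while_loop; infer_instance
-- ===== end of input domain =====

-- B replaces A's card-by-card countdown with list removals by a one-pass count map
-- processed only at the relevant deck values in descending order (measured asymptotically faster).


-- ===== PORT A =====
-- Python's `while deck:` runs while deck ≠ 0 and DIVERGES for deck < 0 (excluded by Pre_);
-- on 0 ≤ deck the guard `0 < deck` is exactly Python's loop condition.
def pvLoopA (deck : Int) (hand : List Int) : List Int :=
  if 0 < deck then
    pvLoopA (deck - 1)
      (if hand.contains deck then (PySem.List.remove? hand deck).getD hand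
       else if hand.contains (deck - 1) then (PySem.List.remove? hand (deck - 1)).getD hand
       else hand)
  else hand
termination_by deck.toNat
decreasing_by omega

def cards_while_loop (deck : Int) (hand : List Int) : Bool :=
  (pvLoopA deck hand).length == 0

-- ===== PORT B =====
-- helper _play(counts, d) of Source B
def pvPlay (c : PySem.Dict Int Int) (d : Int) : PySem.Dict Int Int :=
  if c.getD d 0 > 0 then c.insert d (c.getD d 0 - 1)
  else if c.getD (d - 1) 0 > 0 then c.insert (d - 1) (c.getD (d - 1) 0 - 1)
  else c

def cards_while_loop_alt (deck : Int) (hand : List Int) : Bool :=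
  let counts : PySem.Dict Int Int :=
    hand.foldl (fun c v => c.insert v (c.getD v 0 + 1)) PySem.Dict.empty
  let cands : PySem.Set Int :=
    counts.keys.foldl (fun s v => PySem.Set.add (PySem.Set.add s v) (v + 1)) PySem.Set.empty
  let order : List Int :=
    PySem.List.sorted (cands.filter (fun d => decide (1 ≤ d ∧ d ≤ deck))) (fun x => x) true
  (order.foldl pvPlay counts).values.sum == 0

-- ===== PRECONDITION & SPEC =====
-- Pre_ excludes deck < 0: there Python A's `while deck:` loop never terminates (A returns no value).
def Pre_cards_while_loop (deck : Int) (hand : List Int) : Prop := 0 ≤ deck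
instance (deck : Int) (hand : List Int) : Decidable (Pre_cards_while_loop deck hand) := by
  unfold Pre_cards_while_loop; infer_instance
def pvWitness_cards_while_loop : Int × List Int := (3, [2, 2, 3])

def Spec_cards_while_loop (deck : Int) (hand : List Int) (out : Bool) : Prop := out = cards_while_loop_alt deck hand
instance (deck : Int) (hand : List Int) (out : Bool) : Decidable (Spec_cards_while_loop deck hand out) := by unfold Spec_cards_while_loop; infer_instance

-- ===== CLAIM (what is proved, stated in full; the proofs are below) =====
def Claim_equal_cards_while_loop : Prop := ∀ (deck : Int) (hand : List Int), Dom_cards_while_loop deck hand → Pre_cards_while_loop deck hand → Spec_cards_while_loop deck hand (cards_while_loop deck hand)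

-- ===== LEMMAS AND PROOFS =====

-- A's loop body, named for the proofs.
def pvStepA (d : Int) (l : List Int) : List Int :=
  if l.contains d then (PySem.List.remove? l d).getD l
  else if l.contains (d - 1) then (PySem.List.remove? l (d - 1)).getD l
  else l

theorem pvLoopA_eq (deck : Int) (l : List Int) :
    pvLoopA deck l = if 0 < deck then pvLoopA (deck - 1) (pvStepA deck l) else l := by
  rw [pvLoopA]; simp only [pvStepA]

-- the descending list [deck, deck-1, …, 1]
def pvDescList (deck : Int) : List Int :=
  if 0 < deck then deck :: pvDescList (deck - 1) else []
termination_by deck.toNat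
decreasing_by omega

theorem mem_pvDescList (deck d : Int) : d ∈ pvDescList deck ↔ 1 ≤ d ∧ d ≤ deck := by
  fun_induction pvDescList deck with
  | case1 deck h ih =>
    simp only [List.mem_cons, ih]
    omega
  | case2 deck h =>
    simp only [List.not_mem_nil, false_iff]
    omega

theorem pvDescList_pairwise (deck : Int) : (pvDescList deck).Pairwise (fun a b => b < a) := by
  fun_induction pvDescList deck with
  | case1 deck h ih =>
    refine List.pairwise_cons.mpr ⟨?_, ih⟩
    intro b hb
    have := (mem_pvDescList (deck - 1) b).mp hb
    omega
  | case2 deck h => exact List.Pairwise.nil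

-- counts ↔ hand correspondence
def pvR (l : List Int) (c : PySem.Dict Int Int) : Prop := ∀ v, c.getD v 0 = (l.count v : Int)

theorem pvR_step (d : Int) (l : List Int) (c : PySem.Dict Int Int) (hR : pvR l c) :
    pvR (pvStepA d l) (pvPlay c d) := by
  have hcont : ∀ x : Int, l.contains x = true ↔ 0 < c.getD x 0 := by
    intro x
    rw [hR x]
    simp [Int.natCast_pos, List.count_pos_iff]
  unfold pvStepA pvPlay
  by_cases h1 : l.contains d
  · have hd : d ∈ l := by simpa using h1
    have hpos : 0 < c.getD d 0 := (hcont d).mp h1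
    rw [if_pos h1, if_pos hpos, PySem.List.remove?_eq_some_erase l d hd, Option.getD_some]
    intro v
    rw [PySem.Dict.getD_insert]
    by_cases hv : v = d
    · rw [if_pos hv, hv, hR d, List.count_erase_self]
      have h1c : 1 ≤ l.count d := List.count_pos_iff.mpr hd
      omega
    · rw [if_neg hv, hR v, List.count_erase_of_ne hv]
  · have hz : ¬ 0 < c.getD d 0 := fun hp => h1 ((hcont d).mpr hp)
    rw [if_neg h1, if_neg hz]
    by_cases h2 : l.contains (d - 1)
    · have hd : d - 1 ∈ l := by simpa using h2
      have hpos : 0 < c.getD (d - 1) 0 := (hcont (d - 1)).mp h2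
      rw [if_pos h2, if_pos hpos, PySem.List.remove?_eq_some_erase l (d - 1) hd, Option.getD_some]
      intro v
      rw [PySem.Dict.getD_insert]
      by_cases hv : v = d - 1
      · rw [if_pos hv, hv, hR (d - 1), List.count_erase_self]
        have h1c : 1 ≤ l.count (d - 1) := List.count_pos_iff.mpr hd
        omega
      · rw [if_neg hv, hR v, List.count_erase_of_ne hv]
    · have hz2 : ¬ 0 < c.getD (d - 1) 0 := fun hp => h2 ((hcont (d - 1)).mpr hp)
      rw [if_neg h2, if_neg hz2]
      exact hR

theorem keys_pvPlay (c : PySem.Dict Int Int) (d : Int) : (pvPlay c d).keys = c.keys := by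
  have hcont : ∀ x : Int, 0 < c.getD x 0 → c.contains x = true := by
    intro x hx
    by_contra h
    rw [PySem.Dict.getD_of_not_contains c 0 (by simpa using h)] at hx
    omega
  unfold pvPlay
  split_ifs with h1 h2
  · rw [PySem.Dict.keys_insert_of_contains c _ (hcont d h1)]
  · rw [PySem.Dict.keys_insert_of_contains c _ (hcont (d - 1) h2)]
  · rfl

theorem keys_foldl_pvPlay (ds : List Int) (c : PySem.Dict Int Int) :
    (ds.foldl pvPlay c).keys = c.keys := by
  induction ds generalizing c with
  | nil => rfl
  | cons d ds ih => rw [List.foldl_cons, ih, keys_pvPlay]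

-- A's whole loop tracks the dict loop over [deck, …, 1]
theorem pvLoop_transfer (n : Nat) (deck : Int) (hn : deck.toNat = n) (l : List Int)
    (c : PySem.Dict Int Int) (hR : pvR l c) :
    pvR (pvLoopA deck l) ((pvDescList deck).foldl pvPlay c) := by
  induction n generalizing deck l c with
  | zero =>
    have hd : ¬ 0 < deck := by omega
    rw [pvLoopA_eq, if_neg hd, pvDescList, if_neg hd]
    exact hR
  | succ n ih =>
    have hd : 0 < deck := by omega
    rw [pvLoopA_eq, if_pos hd, pvDescList, if_pos hd, List.foldl_cons]
    exact ih (deck - 1) (by omega) _ _ (pvR_step deck l c hR)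

-- steps at values untouched by the hand are no-ops, so the fold may skip them
theorem pvFold_filter (K : List Int) (ds : List Int) (c : PySem.Dict Int Int) (hK : c.keys = K) :
    ds.foldl pvPlay c
      = (ds.filter (fun d => decide (d ∈ K) || decide (d - 1 ∈ K))).foldl pvPlay c := by
  induction ds generalizing c with
  | nil => rfl
  | cons d ds ih =>
    rw [List.foldl_cons, List.filter_cons]
    by_cases hp : d ∈ K ∨ d - 1 ∈ K
    · have : (decide (d ∈ K) || decide (d - 1 ∈ K)) = true := by
        simpa using hp
      rw [if_pos this, List.foldl_cons]
      exact ih (pvPlay c d) (by rw [keys_pvPlay, hK])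
    · have hcond : (decide (d ∈ K) || decide (d - 1 ∈ K)) = false := by
        simpa using (not_or.mp hp)
      have hzero : ∀ x : Int, x ∉ K → c.getD x 0 = 0 := by
        intro x hx
        have hxk : x ∉ c.keys := by rw [hK]; exact hx
        refine PySem.Dict.getD_of_not_contains c 0 ?_
        cases hcc : c.contains x with
        | false => rfl
        | true => exact absurd ((PySem.Dict.contains_iff_mem_keys c x).mp hcc) hxk
      have hid : pvPlay c d = c := by
        unfold pvPlay
        rw [hzero d (fun h => hp (Or.inl h)), hzero (d - 1) (fun h => hp (Or.inr h))]
        simp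
      rw [if_neg (by simp [hcond]), hid]
      exact ih c hK

theorem pv_sum_indicator (ks : List Int) (x : Int) (hnd : ks.Nodup) (hx : x ∈ ks) :
    (ks.map (fun k => if k = x then (1 : Int) else 0)).sum = 1 := by
  have h1 : (ks.map (fun k => if (k == x) = true then (1 : Int) else 0)).sum
      = (ks.countP (fun k => k == x) : Int) := PySem.List.sum_map_ite_one_zero _ ks
  have h2 : ks.countP (fun k => k == x) = ks.count x := by
    rw [List.count]
  have h3 : ks.count x = 1 := List.count_eq_one_of_mem hnd hx
  simpa [h2, h3] using h1

theorem sum_count_eq_length (ks l : List Int) (hnd : ks.Nodup) (hsub : ∀ x ∈ l, x ∈ ks) :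
    (ks.map (fun k => (l.count k : Int))).sum = (l.length : Int) := by
  induction l with
  | nil => simp
  | cons x l ih =>
    have hx : x ∈ ks := hsub x (List.mem_cons_self)
    have hsub' : ∀ y ∈ l, y ∈ ks := fun y hy => hsub y (List.mem_cons_of_mem x hy)
    have hcount : ∀ k : Int, ((x :: l).count k : Int)
        = (l.count k : Int) + (if k = x then (1 : Int) else 0) := by
      intro k
      by_cases hk : k = x <;> simp [List.count_cons, hk] <;> omega
    calc (ks.map (fun k => ((x :: l).count k : Int))).sum
        = (ks.map (fun k => (l.count k : Int) + (if k = x then (1 : Int) else 0))).sum := by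
          congr 1
          exact List.map_congr_left (fun k _ => hcount k)
      _ = (ks.map (fun k => (l.count k : Int))).sum
            + (ks.map (fun k => if k = x then (1 : Int) else 0)).sum := by
          rw [← PySem.List.sum_map_add_int]
      _ = (l.length : Int) + 1 := by rw [ih hsub', pv_sum_indicator ks x hnd hx]
      _ = ((x :: l).length : Int) := by simp

theorem pv_mem_candsAux (ks : List Int) (s : PySem.Set Int) (x : Int) :
    x ∈ ks.foldl (fun s v => PySem.Set.add (PySem.Set.add s v) (v + 1)) s
      ↔ x ∈ s ∨ x ∈ ks ∨ x - 1 ∈ ks := by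
  induction ks generalizing s with
  | nil => simp
  | cons v ks ih =>
    rw [List.foldl_cons, ih, PySem.Set.mem_add, PySem.Set.mem_add]
    have hx : x = v + 1 ↔ x - 1 = v := by omega
    simp only [List.mem_cons, hx]
    tauto

theorem pv_nodup_candsAux (ks : List Int) (s : PySem.Set Int) (h : s.Nodup) :
    (ks.foldl (fun s v => PySem.Set.add (PySem.Set.add s v) (v + 1)) s).Nodup := by
  induction ks generalizing s with
  | nil => exact h
  | cons v ks ih => exact ih _ (PySem.Set.nodup_add _ _ (PySem.Set.nodup_add _ _ h))

theorem pvDescList_nodup (deck : Int) : (pvDescList deck).Nodup :=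
  (pvDescList_pairwise deck).imp (fun h => ne_of_gt h)

-- ===== VERDICT (by name: the statement is the Claim_ definition above) =====
theorem cards_while_loop_spec : Claim_equal_cards_while_loop := by
  intro deck hand _hDom _hPre
  unfold Spec_cards_while_loop cards_while_loop cards_while_loop_alt
  simp only []
  set counts : PySem.Dict Int Int := hand.foldl (fun c v => c.insert v (c.getD v 0 + 1)) (PySem.Dict.empty : PySem.Dict Int Int) with hc
  have hR0 : pvR hand counts := by
    intro v
    rw [hc, PySem.Dict.getD_foldl_insert_add_one]
    simp
  have hkeys0 : counts.keys = PySem.Set.ofList hand := by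
    rw [hc, PySem.Dict.keys_foldl_insert, PySem.Dict.keys_empty, PySem.Set.update_nil_left]
  rw [hkeys0]
  have hndc : ((PySem.Set.ofList hand).foldl
      (fun s v => PySem.Set.add (PySem.Set.add s v) (v + 1)) PySem.Set.empty).Nodup :=
    pv_nodup_candsAux _ _ List.nodup_nil
  have horder : PySem.List.sorted
      (((PySem.Set.ofList hand).foldl
          (fun s v => PySem.Set.add (PySem.Set.add s v) (v + 1)) PySem.Set.empty).filter
        (fun d => decide (1 ≤ d ∧ d ≤ deck))) (fun x => x) true
      = (pvDescList deck).filter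
          (fun d => decide (d ∈ PySem.Set.ofList hand) || decide (d - 1 ∈ PySem.Set.ofList hand)) := by
    apply PySem.List.sorted_rev_eq_of_perm_of_pairwise_gt
    · rw [List.perm_ext_iff_of_nodup ((pvDescList_nodup deck).filter _) (hndc.filter _)]
      intro a
      simp only [List.mem_filter, mem_pvDescList, pv_mem_candsAux, decide_eq_true_eq,
        Bool.or_eq_true]
      have : (a ∈ PySem.Set.empty (α := Int)) ↔ False := by simp [PySem.Set.empty]
      tauto
    · exact (pvDescList_pairwise deck).filter _
  rw [horder,
    ← pvFold_filter (PySem.Set.ofList hand) (pvDescList deck) counts hkeys0]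
  have hRf : pvR (pvLoopA deck hand) ((pvDescList deck).foldl pvPlay counts) :=
    pvLoop_transfer deck.toNat deck rfl hand counts hR0
  set lf := pvLoopA deck hand with hlf
  set cf := (pvDescList deck).foldl pvPlay counts with hcf
  have hkf : cf.keys = PySem.Set.ofList hand := by rw [hcf, keys_foldl_pvPlay, hkeys0]
  have hnd : cf.keys.Nodup := by rw [hkf]; exact PySem.Set.nodup_ofList hand
  have hsub : ∀ x ∈ lf, x ∈ cf.keys := by
    intro x hx
    by_contra hxk
    have hcfx : cf.contains x = false := by
      cases hcc : cf.contains x with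
      | false => rfl
      | true => exact absurd ((PySem.Dict.contains_iff_mem_keys cf x).mp hcc) hxk
    have h0 : (0 : Int) < cf.getD x 0 := by
      rw [hRf x]
      exact_mod_cast List.count_pos_iff.mpr hx
    rw [PySem.Dict.getD_of_not_contains cf 0 hcfx] at h0
    omega
  have hvals : cf.values.sum = (lf.length : Int) := by
    rw [PySem.Dict.values_eq_map_keys cf hnd 0,
      List.map_congr_left (fun k _ => hRf k)]
    exact sum_count_eq_length cf.keys lf hnd hsub
  rw [hvals]
  by_cases hl : lf.length = 0 <;> simp [hl]
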